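-- pv_equiv track=rewrite | github.com/erlsthetic/kulitan-identification-api | main.py | joinChars
-- ===== SOURCE A (Python) =====
-- CONSONANTS = [
--     'ga', 'gi', 'gu',
--     'ka', 'ki', 'ku',
--     'nga', 'ngi', 'ngu',
--     'ta', 'ti', 'tu',
--     'da', 'di', 'du',
--     'na', 'ni', 'nu',
--     'la', 'li', 'lu',
--     'sa', 'si', 'su',
--     'ma', 'mi', 'mu',
--     'pa', 'pi', 'pu',
--     'ba', 'bi', 'bu',
--     'wi', 'wu',
--     'yi', 'yu'
-- ]
--
-- def joinChars(predictedLabels):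
--     predictedJoined = []
--     for i in range(len(predictedLabels)):
--         lineJoin = ""
--         for j in range(len(predictedLabels[i])):
--             if j == (len(predictedLabels[i])-1) and len(predictedLabels[i]) > 1:
--                 if predictedLabels[i][j] in CONSONANTS:
--                     chopped = predictedLabels[i][j][:-1]
--                     lineJoin += chopped
--             else:
--                 lineJoin += predictedLabels[i][j]
--         lineStr = lineJoin.replace("aa", "á").replace("ai", "e").replace("au", "o").replace(
--             "ii", "í").replace("uu", "ú").replace("ia", "ya").replace("ua", "wa")
--         predictedJoined.append(lineStr)
--     finalString = ''.join(predictedJoined)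
--     return finalString
-- ===== SOURCE B (Python) =====
-- CONSONANTS = [
--     'ga', 'gi', 'gu',
--     'ka', 'ki', 'ku',
--     'nga', 'ngi', 'ngu',
--     'ta', 'ti', 'tu',
--     'da', 'di', 'du',
--     'na', 'ni', 'nu',
--     'la', 'li', 'lu',
--     'sa', 'si', 'su',
--     'ma', 'mi', 'mu',
--     'pa', 'pi', 'pu',
--     'ba', 'bi', 'bu',
--     'wi', 'wu',
--     'yi', 'yu'
-- ]
--
-- def _lineStr(line):
--     if len(line) <= 1:
--         body = ''.join(line)
--     else:
--         last = line[-1]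
--         body = ''.join(line[:-1]) + (last[:-1] if last in CONSONANTS else '')
--     return body.replace("aa", "á").replace("ai", "e").replace("au", "o").replace(
--         "ii", "í").replace("uu", "ú").replace("ia", "ya").replace("ua", "wa")
--
-- def joinChars(predictedLabels):
--     return ''.join(_lineStr(line) for line in predictedLabels)
-- ===== Notes on version B (the rewrite author's own statement) =====
-- stated objective: simpler
-- what changed: Replaces A's two index loops (range(len) with a last-index test inside the inner loop) by a per-line decomposition: join the line's prefix line[:-1], conditionally append the chopped last consonant, apply the replace chain, and map-join over the lines.
import Mathlib
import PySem

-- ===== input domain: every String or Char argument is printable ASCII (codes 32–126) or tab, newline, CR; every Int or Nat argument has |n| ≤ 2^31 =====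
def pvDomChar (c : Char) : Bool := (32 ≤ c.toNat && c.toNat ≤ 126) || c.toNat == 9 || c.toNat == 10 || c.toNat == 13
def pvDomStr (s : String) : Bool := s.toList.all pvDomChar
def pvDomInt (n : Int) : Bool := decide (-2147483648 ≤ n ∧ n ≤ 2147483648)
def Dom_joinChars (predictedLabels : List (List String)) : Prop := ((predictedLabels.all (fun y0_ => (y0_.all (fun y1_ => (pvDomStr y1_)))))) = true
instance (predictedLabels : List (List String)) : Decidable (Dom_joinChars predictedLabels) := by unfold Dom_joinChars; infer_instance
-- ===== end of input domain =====

-- B replaces A's index loops with a per-line decomposition (prefix join + conditional chopped last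
-- element, mapped over the lines); objective: simpler. Same return value on every input.


-- module-level constant CONSONANTS (shared by A and B)
def pvConsonants : List String :=
  ["ga", "gi", "gu",
   "ka", "ki", "ku",
   "nga", "ngi", "ngu",
   "ta", "ti", "tu",
   "da", "di", "du",
   "na", "ni", "nu",
   "la", "li", "lu",
   "sa", "si", "su",
   "ma", "mi", "mu",
   "pa", "pi", "pu",
   "ba", "bi", "bu",
   "wi", "wu",
   "yi", "yu"]

-- the .replace chain both Pythons apply to a joined line (in source order)
def pvRepl (cs : List Char) : List Char :=
  PySem.Chars.replace (PySem.Chars.replace (PySem.Chars.replace (PySem.Chars.replace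
    (PySem.Chars.replace (PySem.Chars.replace (PySem.Chars.replace cs
      "aa".toList "á".toList) "ai".toList "e".toList) "au".toList "o".toList)
      "ii".toList "í".toList) "uu".toList "ú".toList) "ia".toList "ya".toList)
      "ua".toList "wa".toList

-- ===== PORT A =====
-- the body of A's inner loop over j (one step of building lineJoin)
def pvStepA (line : List String) (lj : List Char) (j : Int) : List Char :=
  if j = (line.length : Int) - 1 ∧ 1 < (line.length : Int) then
    if PySem.List.pyGetD line j "" ∈ pvConsonants then
      lj ++ PySem.List.slice (PySem.List.pyGetD line j "").toList none (some (-1))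
    else lj
  else lj ++ (PySem.List.pyGetD line j "").toList

-- A's inner loop: lineJoin for one line
def pvLineJoin (line : List String) : List Char :=
  (PySem.List.pyRange 0 (line.length : Int)).foldl (pvStepA line) ([] : List Char)

def joinChars (predictedLabels : List (List String)) : String :=
  let predictedJoined :=
    (PySem.List.pyRange 0 (predictedLabels.length : Int)).foldl (fun acc i =>
      acc ++ [pvRepl (pvLineJoin (PySem.List.pyGetD predictedLabels i []))])
      ([] : List (List Char))
  String.ofList (PySem.Chars.join [] predictedJoined)

-- ===== PORT B =====
def pvLineStr (line : List String) : List Char :=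
  let body :=
    if line.length ≤ 1 then
      PySem.Chars.join [] (line.map String.toList)
    else
      let last := PySem.List.pyGetD line (-1) ""
      PySem.Chars.join [] ((PySem.List.slice line none (some (-1))).map String.toList) ++
        (if last ∈ pvConsonants then PySem.List.slice last.toList none (some (-1)) else [])
  pvRepl body

def joinChars_alt (predictedLabels : List (List String)) : String :=
  String.ofList (PySem.Chars.join [] (predictedLabels.map pvLineStr))

-- ===== PRECONDITION & SPEC =====
def Spec_joinChars (predictedLabels : List (List String)) (out : String) : Prop := out = joinChars_alt predictedLabels
instance (predictedLabels : List (List String)) (out : String) : Decidable (Spec_joinChars predictedLabels out) := by unfold Spec_joinChars; infer_instance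

-- ===== CLAIM (what is proved, stated in full; the proofs are below) =====
def Claim_equal_joinChars : Prop := ∀ (predictedLabels : List (List String)), Dom_joinChars predictedLabels → Spec_joinChars predictedLabels (joinChars predictedLabels)

-- ===== LEMMAS AND PROOFS =====

-- ''.join over lists of characters is flatten
theorem pv_join_nil_eq_flatten (ps : List (List Char)) :
    PySem.Chars.join [] ps = ps.flatten := by
  induction ps with
  | nil => simp [PySem.Chars.join_nil]
  | cons p ps ih =>
    cases ps with
    | nil => simp [PySem.Chars.join_singleton]
    | cons q r =>
      rw [PySem.Chars.join_cons_cons]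
      simp [ih]

-- A's inner index loop computes exactly B's per-line body (before the replace chain)
theorem pv_line_eq (line : List String) : pvRepl (pvLineJoin line) = pvLineStr line := by
  unfold pvLineStr
  congr 1
  match line with
  | [] => simp [pvLineJoin, PySem.List.pyRange_one_eq_nil, PySem.Chars.join_nil]
  | [x] =>
    simp [pvLineJoin, pvStepA, PySem.List.pyRange_one, PySem.Chars.join_singleton]
  | x :: y :: rest =>
    set line := x :: y :: rest with hline
    have hlen : 2 ≤ line.length := by simp [hline]
    have hne : line ≠ [] := by simp [hline]
    have hsplit : (line.length : Int) = ((line.length - 1 : Nat) : Int) + 1 := by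
      push_cast [Nat.cast_sub (by omega : 1 ≤ line.length)]; ring
    have hlast : PySem.List.pyGetD line (-1) "" = line.getLast hne :=
      PySem.List.pyGetD_neg_one line "" hne
    have hlastN : PySem.List.pyGetD line ((line.length - 1 : Nat) : Int) "" = line.getLast hne := by
      rw [PySem.List.pyGetD_natCast, List.getD_eq_getElem?_getD, List.getElem?_eq_getElem (by omega),
        Option.getD_some, List.getLast_eq_getElem]
    have hpre : List.foldl (pvStepA line) ([] : List Char)
        (PySem.List.pyRange 0 ((line.length - 1 : Nat) : Int)) =
        line.dropLast.flatMap String.toList := by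
      rw [PySem.List.foldl_congr_mem _ (pvStepA line)
        (fun lj j => lj ++ (PySem.List.pyGetD line.dropLast j "").toList) _ ?_]
      · have := PySem.List.foldl_pyRange_zero_pyGetD' line.dropLast ""
          (fun (lj : List Char) (s : String) => lj ++ s.toList) ([] : List Char)
        rw [List.length_dropLast] at this
        rw [this, PySem.List.foldl_append_eq_flatMap, List.nil_append]
      · intro acc j hj
        rw [PySem.List.mem_pyRange_one] at hj
        have hj2 : j < (line.length : Int) - 1 := by omega
        unfold pvStepA
        rw [if_neg (by omega)]
        congr 2
        rw [PySem.List.pyGetD_of_nonneg line "" hj.1, PySem.List.pyGetD_of_nonneg _ "" hj.1]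
        rw [List.getD_eq_getElem?_getD, List.getD_eq_getElem?_getD, List.getElem?_dropLast]
        rw [if_pos (by omega)]
    rw [if_neg (by omega)]
    unfold pvLineJoin
    rw [hsplit, PySem.List.pyRange_one_succ_right (by positivity), List.foldl_append, hpre]
    simp only [List.foldl_cons, List.foldl_nil]
    unfold pvStepA
    rw [if_pos (by constructor <;> omega), hlastN, hlast]
    rw [PySem.List.slice_to_neg_one, PySem.List.slice_to_neg_one line, pv_join_nil_eq_flatten, ← List.flatMap_def]
    split_ifs with hmem
    · rfl
    · simp

-- ===== VERDICT =====
theorem joinChars_spec : Claim_equal_joinChars := by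
  intro pl _
  show joinChars pl = joinChars_alt pl
  unfold joinChars joinChars_alt
  rw [PySem.List.foldl_pyRange_zero_pyGetD' pl ([] : List String)
        (fun acc line => acc ++ [pvRepl (pvLineJoin line)]) ([] : List (List Char)),
      PySem.List.foldl_append_singleton_eq_map (fun line => pvRepl (pvLineJoin line)) pl
        ([] : List (List Char)), List.nil_append]
  rw [List.map_congr_left (fun line _ => pv_line_eq line)]
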